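-- pv_equiv track=rewrite | github.com/AlexandraB-C/Cryptography_labs | lab4/lab_4.py | format_binary_output
-- ===== SOURCE A (Python) =====
-- def format_binary_output(bits, bits_per_group=4, groups_per_line=8):
--     """format binary string for readable output"""
--     result = []
--     for i in range(0, len(bits), bits_per_group):
--         result.append(bits[i:i + bits_per_group])
--
--     formatted = []
--     for i in range(0, len(result), groups_per_line):
--         formatted.append(' '.join(result[i:i + groups_per_line]))
--
--     return '\n'.join(formatted)
-- ===== SOURCE B (Python) =====
-- def format_binary_output(bits, bits_per_group=4, groups_per_line=8):
--     """format binary string for readable output"""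
--     chars_per_line = bits_per_group * groups_per_line
--     pieces = []
--     for i in range(0, len(bits), chars_per_line):
--         if i:
--             pieces.append('\n')
--         line = bits[i:i + chars_per_line]
--         for j in range(0, len(line), bits_per_group):
--             if j:
--                 pieces.append(' ')
--             pieces.append(line[j:j + bits_per_group])
--     return ''.join(pieces)
-- ===== Notes on version B (the rewrite author's own statement) =====
-- stated objective: alternative
-- what changed: B replaces A's staged pipeline (build the flat list of all groups, re-group it into lines, join twice) by a single fused pass that walks the string in line-sized strides and emits group pieces and the space/newline separators inline into one flat buffer joined once.
-- outside the precondition, e.g. on format_binary_output('11', -1, -1): A returns '', B returns '\n'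
import Mathlib
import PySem

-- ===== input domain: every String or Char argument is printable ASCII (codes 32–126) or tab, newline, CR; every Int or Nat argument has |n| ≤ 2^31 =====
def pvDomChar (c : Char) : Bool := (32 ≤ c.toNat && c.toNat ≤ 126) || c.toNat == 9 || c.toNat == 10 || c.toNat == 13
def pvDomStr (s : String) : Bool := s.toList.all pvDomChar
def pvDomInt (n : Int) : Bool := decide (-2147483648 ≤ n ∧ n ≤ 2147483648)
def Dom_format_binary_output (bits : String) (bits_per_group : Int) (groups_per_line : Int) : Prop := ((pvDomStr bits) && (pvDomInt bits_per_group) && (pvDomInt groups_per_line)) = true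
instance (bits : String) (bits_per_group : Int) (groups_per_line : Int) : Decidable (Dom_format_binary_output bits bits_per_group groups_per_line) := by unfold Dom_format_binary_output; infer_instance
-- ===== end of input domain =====

-- B replaces A's staged pipeline (flat group list, regrouped, two joins) by one fused pass
-- that emits group pieces and the space/newline separators inline into a single flat buffer;
-- objective: alternative decomposition, same cost.

-- ===== PORT A =====
def format_binary_output (bits : String) (bits_per_group : Int) (groups_per_line : Int) : String :=
  let bl := bits.toList
  -- result = []; for i in range(0, len(bits), bits_per_group): result.append(bits[i:i+bits_per_group])
  let result : List (List Char) :=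
    (PySem.List.pyRange 0 (PySem.Chars.len bl) bits_per_group).foldl
      (fun acc i => acc ++ [PySem.Chars.slice bl (some i) (some (i + bits_per_group))]) []
  -- formatted = []; for i in range(0, len(result), groups_per_line): formatted.append(' '.join(result[i:i+groups_per_line]))
  let formatted : List (List Char) :=
    (PySem.List.pyRange 0 (result.length : Int) groups_per_line).foldl
      (fun acc i => acc ++ [PySem.Chars.join [' '] (PySem.List.slice result (some i) (some (i + groups_per_line)))]) []
  String.ofList (PySem.Chars.join ['\n'] formatted)

-- ===== PORT B =====
def format_binary_output_alt (bits : String) (bits_per_group : Int) (groups_per_line : Int) : String :=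
  let bl := bits.toList
  let chars_per_line := bits_per_group * groups_per_line
  -- pieces = []
  -- for i in range(0, len(bits), chars_per_line):
  --   if i: pieces.append('\n')
  --   line = bits[i:i + chars_per_line]
  --   for j in range(0, len(line), bits_per_group):
  --     if j: pieces.append(' ')
  --     pieces.append(line[j:j + bits_per_group])
  -- return ''.join(pieces)
  let pieces : List (List Char) :=
    (PySem.List.pyRange 0 (PySem.Chars.len bl) chars_per_line).foldl
      (fun pieces i =>
        let line := PySem.Chars.slice bl (some i) (some (i + chars_per_line))
        (PySem.List.pyRange 0 (PySem.Chars.len line) bits_per_group).foldl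
          (fun pieces j =>
            (if j == 0 then pieces else pieces ++ [[' ']])
              ++ [PySem.Chars.slice line (some j) (some (j + bits_per_group))])
          (if i == 0 then pieces else pieces ++ [['\n']])) []
  String.ofList (PySem.Chars.join [] pieces)

-- ===== PRECONDITION & SPEC =====
-- Pre_ excludes (a) step 0, where Python's range raises ValueError in both programs, and
-- (b) the nonsense corner of two negative group sizes on a string longer than their product,
-- where A's empty result and B's run of empty lines are both accidental artefacts, neither specified.
def Pre_format_binary_output (bits : String) (bits_per_group : Int) (groups_per_line : Int) : Prop :=
  bits_per_group ≠ 0 ∧ groups_per_line ≠ 0 ∧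
  ¬(bits_per_group < 0 ∧ groups_per_line < 0 ∧ bits_per_group * groups_per_line < (bits.toList.length : Int))
instance (bits : String) (bits_per_group : Int) (groups_per_line : Int) : Decidable (Pre_format_binary_output bits bits_per_group groups_per_line) := by unfold Pre_format_binary_output; infer_instance

def pvWitness_format_binary_output : String × Int × Int := ("10110110", 4, 2)

def Spec_format_binary_output (bits : String) (bits_per_group : Int) (groups_per_line : Int) (out : String) : Prop := out = format_binary_output_alt bits bits_per_group groups_per_line
instance (bits : String) (bits_per_group : Int) (groups_per_line : Int) (out : String) : Decidable (Spec_format_binary_output bits bits_per_group groups_per_line out) := by unfold Spec_format_binary_output; infer_instance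

-- ===== CLAIM (what is proved, stated in full; the proofs are below) =====
def Claim_equal_format_binary_output : Prop := ∀ (bits : String) (bits_per_group : Int) (groups_per_line : Int), Dom_format_binary_output bits bits_per_group groups_per_line → Pre_format_binary_output bits bits_per_group groups_per_line → Spec_format_binary_output bits bits_per_group groups_per_line (format_binary_output bits bits_per_group groups_per_line)

-- ===== LEMMAS AND PROOFS =====
def pvChunks {α : Type} (s : Nat) : List α → List (List α)
  | [] => []
  | x :: xs => (x :: xs).take s :: pvChunks s (xs.drop (s - 1))
termination_by l => l.length
decreasing_by simpa using Nat.lt_succ_of_le (List.length_drop_le xs (s-1))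

theorem pvChunks_cons_pos {α : Type} {s : Nat} (hs : 0 < s) (x : α) (xs : List α) :
    pvChunks s (x :: xs) = (x :: xs).take s :: pvChunks s ((x :: xs).drop s) := by
  obtain ⟨t, rfl⟩ := Nat.exists_eq_add_of_lt hs
  simp [pvChunks]

theorem pvDropCons {α : Type} {n : Nat} (hn : 0 < n) (x : α) (xs : List α) :
    xs.drop (n - 1) = (x :: xs).drop n := by
  obtain ⟨t, rfl⟩ := Nat.exists_eq_succ_of_ne_zero hn.ne'
  simp

theorem pvCnt_succ {s len : Nat} (hs : 0 < s) (hl : 0 < len) :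
    (len + s - 1) / s = (len - s + s - 1) / s + 1 := by
  rcases (show len ≤ s ∨ s < len by omega) with h | h
  · have h1 : len - s = 0 := by omega
    rw [h1, Nat.zero_add]
    have h2 : (s - 1) / s = 0 := Nat.div_eq_of_lt (by omega)
    have h3 : (len + s - 1) / s = 1 := Nat.div_eq_of_lt_le (by omega) (by omega)
    omega
  · have h1 : len - s + s - 1 = len - 1 := by omega
    have h2 : len + s - 1 = (len - 1) + s := by omega
    rw [h1, h2, Nat.add_div_right _ hs]

theorem pvChunks_as_range {α : Type} {s : Nat} (hs : 0 < s) :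
    ∀ l : List α,
      (List.range ((l.length + s - 1) / s)).map (fun k => (l.drop (s * k)).take s) = pvChunks s l := by
  intro l
  induction l using pvChunks.induct s with
  | case1 =>
    have : (([]:List α).length + s - 1) / s = 0 := Nat.div_eq_of_lt (by simp; omega)
    rw [this]
    simp [pvChunks]
  | case2 x xs ih =>
    have hdrop : xs.drop (s - 1) = (x :: xs).drop s := pvDropCons hs x xs
    rw [pvChunks_cons_pos hs, ← hdrop]
    have hcnt : ((x :: xs).length + s - 1) / s = ((xs.drop (s-1)).length + s - 1) / s + 1 := by
      rw [List.length_drop, List.length_cons]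
      have harg : xs.length - (s - 1) = xs.length + 1 - s := by omega
      rw [harg]
      exact pvCnt_succ hs (by omega)
    rw [hcnt, List.range_succ_eq_map, List.map_cons]
    rw [Nat.mul_zero, List.drop_zero, List.map_map]
    congr 1
    rw [← ih]
    apply List.map_congr_left
    intro k _
    simp only [Function.comp_apply, hdrop]
    rw [List.drop_drop]
    rw [Nat.succ_eq_add_one, Nat.mul_add, Nat.mul_one]
    congr 2
    omega

theorem pvSliceLoop {α : Type} {s : Nat} (hs : 0 < s) (l : List α) :
    (PySem.List.pyRange 0 (l.length : Int) (s : Int)).map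
      (fun i => PySem.List.slice l (some i) (some (i + (s : Int)))) = pvChunks s l := by
  rw [PySem.List.pyRange_of_pos _ _ (show (0:Int) < (s:Int) by exact_mod_cast hs)]
  by_cases h0 : l = []
  · subst h0; simp [pvChunks]
  · have hlen : 0 < l.length := List.length_pos_iff.mpr h0
    rw [if_pos (show (0:Int) < (l.length:Int) by exact_mod_cast hlen)]
    have h1 : ((l.length:Int) - 0 + ↑s - 1) = ((l.length + s - 1 : Nat) : Int) := by omega
    have hcnt : (((l.length:Int) - 0 + ↑s - 1) / ↑s).toNat = (l.length + s - 1) / s := by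
      rw [h1, ← Int.natCast_ediv]
      exact Int.toNat_natCast _
    rw [hcnt, ← pvChunks_as_range hs l, List.map_map]
    apply List.map_congr_left
    intro k _
    have hc : (0 + (s:Int) * (k:Int)) = ((s * k : Nat) : Int) := by push_cast; ring
    simp only [Function.comp_apply, hc, PySem.List.slice_natCast_add]

theorem pvChunks_eq_cons {α : Type} {s : Nat} (hs : 0 < s) {l : List α} (hl : l ≠ []) :
    pvChunks s l = l.take s :: pvChunks s (l.drop s) := by
  match l with
  | [] => exact absurd rfl hl
  | x :: xs => exact pvChunks_cons_pos hs x xs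

theorem pvChunks_ne_nil {α : Type} {s : Nat} (hs : 0 < s) {l : List α} (hl : l ≠ []) :
    pvChunks s l ≠ [] := by
  rw [pvChunks_eq_cons hs hl]; simp

theorem pvChunks_take {α : Type} {g : Nat} (hg : 0 < g) :
    ∀ (p : Nat) (l : List α), (pvChunks g l).take p = pvChunks g (l.take (g * p)) := by
  intro p
  induction p with
  | zero => intro l; simp [pvChunks]
  | succ p ih =>
    intro l
    by_cases hl : l = []
    · subst hl; simp [pvChunks]
    · rw [pvChunks_eq_cons hg hl, List.take_succ_cons, ih]
      have hlt : l.take (g * (p + 1)) ≠ [] := by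
        simp [List.take_eq_nil_iff]
        constructor
        · positivity
        · exact hl
      rw [pvChunks_eq_cons hg hlt, List.take_take, List.drop_take]
      have h1 : min g (g * (p + 1)) = g := by
        have : g ≤ g * (p + 1) := Nat.le_mul_of_pos_right g (by omega)
        omega
      have h2 : g * (p + 1) - g = g * p := by rw [Nat.mul_succ]; omega
      rw [h1, h2]

theorem pvChunks_drop {α : Type} {g : Nat} (hg : 0 < g) :
    ∀ (p : Nat) (l : List α), (pvChunks g l).drop p = pvChunks g (l.drop (g * p)) := by
  intro p
  induction p with
  | zero => intro l; simp
  | succ p ih =>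
    intro l
    by_cases hl : l = []
    · subst hl; simp [pvChunks]
    · rw [pvChunks_eq_cons hg hl, List.drop_succ_cons, ih, List.drop_drop]
      rw [Nat.mul_succ]
      congr 2
      omega

theorem pvChunks_chunks {α : Type} {g p : Nat} (hg : 0 < g) (hp : 0 < p) :
    ∀ l : List α, pvChunks p (pvChunks g l) = (pvChunks (g * p) l).map (pvChunks g) := by
  have hc : 0 < g * p := Nat.mul_pos hg hp
  intro l
  induction l using pvChunks.induct (g * p) with
  | case1 => simp [pvChunks]
  | case2 x xs ih =>
    have hdrop : xs.drop (g * p - 1) = (x :: xs).drop (g * p) := pvDropCons hc x xs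
    rw [hdrop] at ih
    have hl : (x :: xs) ≠ [] := by simp
    rw [pvChunks_eq_cons hp (pvChunks_ne_nil hg hl), pvChunks_take hg, pvChunks_drop hg, ih,
        pvChunks_eq_cons hc hl, List.map_cons]

theorem pvFoldl_append_singleton {α β : Type} (f : α → β) :
    ∀ (xs : List α) (init : List β),
      xs.foldl (fun acc x => acc ++ [f x]) init = init ++ xs.map f := by
  intro xs
  induction xs with
  | nil => simp
  | cons x xs ih => intro init; simp [ih]

theorem pvRange_neg_empty {s : Int} (hs : s < 0) (n : Nat) :
    PySem.List.pyRange 0 (n : Int) s = [] := by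
  have h0 : s ≠ 0 := hs.ne
  have h1 : ¬ (0 < s) := by omega
  have h2 : ¬ ((n:Int) < 0) := by omega
  simp [PySem.List.pyRange, h0, h1, h2]

theorem pvRange_nil (s : Int) : PySem.List.pyRange 0 0 s = [] := by
  rcases (show s < 0 ∨ s = 0 ∨ 0 < s by omega) with h | h | h
  · exact pvRange_neg_empty h 0
  · simp [PySem.List.pyRange, h]
  · simp [PySem.List.pyRange, h.ne', h]

-- A's ' '.join slice loop over a list of groups, as chunks
theorem pvJoinLoop {s : Nat} (hs : 0 < s) (R : List (List Char)) :
    (PySem.List.pyRange 0 (R.length : Int) (s : Int)).foldl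
        (fun acc i => acc ++ [PySem.Chars.join [' '] (PySem.List.slice R (some i) (some (i + (s:Int))))]) []
      = (pvChunks s R).map (PySem.Chars.join [' ']) := by
  rw [pvFoldl_append_singleton (f := fun i => PySem.Chars.join [' '] (PySem.List.slice R (some i) (some (i + (s:Int)))))]
  rw [List.nil_append, show (fun i => PySem.Chars.join [' '] (PySem.List.slice R (some i) (some (i + (s:Int)))))
        = (PySem.Chars.join [' ']) ∘ (fun i => PySem.List.slice R (some i) (some (i + (s:Int)))) from rfl,
      ← List.map_map, pvSliceLoop hs]

-- ==== new machinery for B's fused, separator-emitting pass ====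

-- a conditional-emit foldl is a flatMap
theorem pvFoldl_condFlat {α : Type} (u v : Int → List α) :
    ∀ (xs : List Int) (init : List α),
      xs.foldl (fun acc i => (if i == 0 then acc else acc ++ u i) ++ v i) init
        = init ++ xs.flatMap (fun i => (if i == 0 then [] else u i) ++ v i) := by
  intro xs
  induction xs with
  | nil => simp
  | cons x xs ih =>
    intro init
    rw [List.foldl_cons, ih]
    by_cases h : x = (0:Int) <;> simp [h]

theorem pvJoinNil : ∀ xs : List (List Char), PySem.Chars.join [] xs = xs.flatten := by
  intro xs
  induction xs with
  | nil => simp [PySem.Chars.join_nil]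
  | cons x xs ih =>
    cases xs with
    | nil => simp [PySem.Chars.join_singleton]
    | cons y ys => rw [PySem.Chars.join_cons_cons, ih]; simp

theorem pvSepFlat (sep : Char) (F : Int → List (List Char)) :
    ∀ ts : List Int, (∀ i ∈ ts, i ≠ 0) →
      (ts.flatMap (fun i => (if i == 0 then [] else [[sep]]) ++ F i)).flatten
        = ts.flatMap (fun i => sep :: (F i).flatten) := by
  intro ts
  induction ts with
  | nil => simp
  | cons x xs ih =>
    intro h
    have hx : (x == (0:Int)) = false := beq_eq_false_iff_ne.mpr (h x (by simp))
    have ih' := ih (fun i hi => h i (by simp [hi]))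
    rw [List.flatMap_cons, List.flatMap_cons, hx, List.flatten_append, ih']
    simp

theorem pvJoinConsFlat (sep : Char) :
    ∀ (ys : List (List Char)) (y : List Char),
      PySem.Chars.join [sep] (y :: ys) = y ++ ys.flatMap (fun z => sep :: z) := by
  intro ys
  induction ys with
  | nil => intro y; simp [PySem.Chars.join_singleton]
  | cons z zs ih => intro y; rw [PySem.Chars.join_cons_cons, ih]; simp

-- joining a flat buffer of pieces with inline separators = separator-join of the per-stride strings
theorem pvKey (sep : Char) {s : Int} (hs : 0 < s) (n : Nat) (F : Int → List (List Char)) :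
    PySem.Chars.join [] ((PySem.List.pyRange 0 (n : Int) s).flatMap
        (fun i => (if i == 0 then [] else [[sep]]) ++ F i))
      = PySem.Chars.join [sep] ((PySem.List.pyRange 0 (n : Int) s).map
        (fun i => PySem.Chars.join [] (F i))) := by
  rw [PySem.List.pyRange_of_pos _ _ hs]
  by_cases h0 : n = 0
  · subst h0
    simp [PySem.Chars.join_nil]
  · have hlt : (0:Int) < (n:Int) := by exact_mod_cast Nat.pos_of_ne_zero h0
    rw [if_pos hlt]
    have hc1 : 1 ≤ (((n:Int) - 0 + s - 1) / s).toNat := by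
      have : (1:Int) ≤ ((n:Int) - 0 + s - 1) / s := by
        rw [Int.le_ediv_iff_mul_le hs]; omega
      omega
    obtain ⟨m, hm⟩ : ∃ m, (((n:Int) - 0 + s - 1) / s).toNat = m + 1 :=
      ⟨(((n:Int) - 0 + s - 1) / s).toNat - 1, by omega⟩
    have htail : ∀ i ∈ (List.range m).map ((fun k : Nat => (0:Int) + s * (k:Int)) ∘ Nat.succ), i ≠ 0 := by
      intro i hi
      simp only [List.mem_map, Function.comp_apply] at hi
      obtain ⟨k, _, rfl⟩ := hi
      have hpos : (0:Int) < s * ((k + 1 : Nat) : Int) :=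
        mul_pos hs (by exact_mod_cast Nat.succ_pos k)
      push_cast at hpos ⊢
      omega
    rw [hm, List.range_succ_eq_map, List.map_cons, List.map_map]
    have h00 : (0:Int) + s * ((0:Nat):Int) = 0 := by simp
    rw [h00, List.flatMap_cons, List.map_cons, pvJoinConsFlat]
    rw [if_pos (beq_self_eq_true (0:Int)), List.nil_append, pvJoinNil, List.flatten_append]
    rw [pvSepFlat sep F _ htail, List.flatMap_map]
    simp [pvJoinNil]
    simp [Function.comp_def, Nat.succ_eq_add_one, Nat.cast_add, Nat.cast_one]
    rw [List.flatMap_map]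

-- B's nested conditional-emit foldl, flattened to one flatMap
theorem pvOuterFlat (bl : List Char) (g cpl : Int) :
    (PySem.List.pyRange 0 ((bl.length : Int)) cpl).foldl
        (fun acc i =>
          (PySem.List.pyRange 0 (((PySem.List.slice bl (some i) (some (i + cpl))).length : Int)) g).foldl
            (fun acc2 j => (if j == 0 then acc2 else acc2 ++ [[' ']])
              ++ [PySem.List.slice (PySem.List.slice bl (some i) (some (i + cpl))) (some j) (some (j + g))])
            (if i == 0 then acc else acc ++ [['\n']])) []
      = (PySem.List.pyRange 0 ((bl.length : Int)) cpl).flatMap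
          (fun i => (if i == 0 then [] else [['\n']]) ++
            (PySem.List.pyRange 0 (((PySem.List.slice bl (some i) (some (i + cpl))).length : Int)) g).flatMap
              (fun j => (if j == 0 then [] else [[' ']]) ++
                [PySem.List.slice (PySem.List.slice bl (some i) (some (i + cpl))) (some j) (some (j + g))])) := by
  have hf : (fun (acc : List (List Char)) (i : Int) =>
      (PySem.List.pyRange 0 (((PySem.List.slice bl (some i) (some (i + cpl))).length : Int)) g).foldl
        (fun acc2 j => (if j == 0 then acc2 else acc2 ++ [[' ']])
          ++ [PySem.List.slice (PySem.List.slice bl (some i) (some (i + cpl))) (some j) (some (j + g))])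
        (if i == 0 then acc else acc ++ [['\n']]))
      = (fun acc i => (if i == 0 then acc else acc ++ [['\n']]) ++
          (PySem.List.pyRange 0 (((PySem.List.slice bl (some i) (some (i + cpl))).length : Int)) g).flatMap
            (fun j => (if j == 0 then [] else [[' ']]) ++
              [PySem.List.slice (PySem.List.slice bl (some i) (some (i + cpl))) (some j) (some (j + g))])) := by
    funext acc i
    exact pvFoldl_condFlat _ _ _ _
  rw [hf, pvFoldl_condFlat, List.nil_append]

-- ===== VERDICT (by name: the statement is the Claim_ definition above) =====
theorem format_binary_output_spec : Claim_equal_format_binary_output := by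
  intro bits bpg gpl _ hpre
  obtain ⟨hg0, hp0, hneg⟩ := hpre
  unfold Spec_format_binary_output format_binary_output format_binary_output_alt
  simp only [PySem.Chars.len_eq, PySem.Chars.slice_eq_listSlice]
  rw [pvOuterFlat bits.toList bpg (bpg * gpl)]
  rcases (show bpg < 0 ∨ 0 < bpg by omega) with hg | hg
  · -- bits_per_group < 0 : A returns ""
    rw [pvRange_neg_empty hg bits.toList.length]
    simp only [List.foldl_nil, List.length_nil, Nat.cast_zero, pvRange_nil, List.foldl_nil]
    rcases (show gpl < 0 ∨ 0 < gpl by omega) with hp | hp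
    · -- both negative: Pre_ gives len(bits) ≤ bpg*gpl, so B emits at most one line of no groups
      have hc : 0 < bpg * gpl := mul_pos_of_neg_of_neg hg hp
      have hlen : (bits.toList.length : Int) ≤ bpg * gpl := by
        by_contra h
        exact hneg ⟨hg, hp, by omega⟩
      rcases (show bits.toList.length = 0 ∨ 0 < bits.toList.length by omega) with h0 | h0
      · rw [h0, Nat.cast_zero, pvRange_nil]
        simp [PySem.Chars.join_nil]
      · have hone : PySem.List.pyRange 0 (bits.toList.length : Int) (bpg * gpl) = [0] := by
          rw [PySem.List.pyRange_of_pos _ _ hc, if_pos (by exact_mod_cast h0)]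
          have hcnt : (((bits.toList.length : Int) - 0 + bpg * gpl - 1) / (bpg * gpl)).toNat = 1 := by
            have h1 : ((bits.toList.length : Int) - 0 + bpg * gpl - 1) / (bpg * gpl) = 1 := by
              have hx : ((bits.toList.length : Int) - 0 + bpg * gpl - 1)
                  = ((bits.toList.length : Int) - 1) + 1 * (bpg * gpl) := by ring
              rw [hx, Int.add_mul_ediv_right _ _ hc.ne',
                  Int.ediv_eq_zero_of_lt (by omega) (by omega)]
              omega
            rw [h1]; rfl
          rw [hcnt]
          simp
        rw [hone]
        simp only [List.flatMap_cons, List.flatMap_nil]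
        rw [pvRange_neg_empty hg]
        simp [PySem.Chars.join_nil]
    · -- bpg < 0 < gpl : chars_per_line < 0, B's stride list is empty too
      have hc : bpg * gpl < 0 := mul_neg_of_neg_of_pos hg hp
      rw [pvRange_neg_empty hc bits.toList.length]
      simp [PySem.Chars.join_nil]
  · rcases (show gpl < 0 ∨ 0 < gpl by omega) with hp | hp
    · -- 0 < bpg, gpl < 0 : A's second loop and B's stride list are both empty
      have hc : bpg * gpl < 0 := mul_neg_of_pos_of_neg hg hp
      rw [pvRange_neg_empty hc bits.toList.length, pvRange_neg_empty hp]
      simp [PySem.Chars.join_nil]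
    · -- main case: both positive
      have hg' : 0 < bpg.toNat := by omega
      have hp' : 0 < gpl.toNat := by omega
      have hbg : bpg = ((bpg.toNat : Nat) : Int) := by omega
      have hbp : gpl = ((gpl.toNat : Nat) : Int) := by omega
      rw [hbg, hbp]
      set l := bits.toList with hl
      -- A's first loop builds the flat group list
      rw [pvFoldl_append_singleton
            (f := fun i => PySem.List.slice l (some i) (some (i + ((bpg.toNat : Nat) : Int)))),
          List.nil_append, pvSliceLoop hg' l]
      -- A's second loop groups it into lines
      rw [pvJoinLoop hp']
      -- B: one flat buffer with inline separators = newline-join of the per-line space-joins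
      have hstep : ((bpg.toNat : Int)) * ((gpl.toNat : Int)) = (((bpg.toNat * gpl.toNat : Nat)) : Int) := by
        push_cast; ring
      rw [hstep]
      have hcInt : (0:Int) < (((bpg.toNat * gpl.toNat : Nat)) : Int) := by
        exact_mod_cast Nat.mul_pos hg' hp'
      have hgInt : (0:Int) < ((bpg.toNat : Nat) : Int) := by exact_mod_cast hg'
      rw [pvKey '\n' hcInt l.length]
      simp only [pvKey ' ' hgInt, PySem.Chars.join_singleton]
      have hB : (PySem.List.pyRange 0 (l.length : Int) (((bpg.toNat * gpl.toNat : Nat)) : Int)).map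
            (fun i =>
              PySem.Chars.join [' ']
                ((PySem.List.pyRange 0
                    (((PySem.List.slice l (some i) (some (i + (((bpg.toNat * gpl.toNat : Nat)) : Int)))).length : Int))
                    ((bpg.toNat : Nat) : Int)).map
                  (fun j => PySem.List.slice
                    (PySem.List.slice l (some i) (some (i + (((bpg.toNat * gpl.toNat : Nat)) : Int))))
                    (some j) (some (j + ((bpg.toNat : Nat) : Int))))))
          = (pvChunks (bpg.toNat * gpl.toNat) l).map
              (fun line => PySem.Chars.join [' '] (pvChunks bpg.toNat line)) := by
        rw [← pvSliceLoop (Nat.mul_pos hg' hp') l, List.map_map]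
        apply List.map_congr_left
        intro i _
        simp only [Function.comp_apply]
        rw [pvSliceLoop hg']
      rw [hB, pvChunks_chunks hg' hp', List.map_map]
      rfl
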